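-- pv_equiv track=rewrite | github.com/seekerzz/tower-ai | scripts/state_cleanup.py | parse_inbox_entries
-- ===== SOURCE A (Python) =====
-- def parse_inbox_entries(content):
--     """解析状态文件中的Inbox条目"""
--     # 找到Inbox区域
--     inbox_start = content.find("## [Inbox")
--     if inbox_start == -1:
--         return [], content, ""
--
--     # 找到下一个##标题或文件结尾
--     next_section = content.find("## [", inbox_start + 1)
--     if next_section == -1:
--         inbox_content = content[inbox_start:]
--         after_inbox = ""
--     else:
--         inbox_content = content[inbox_start:next_section]
--         after_inbox = content[next_section:]
--
--     before_inbox = content[:inbox_start]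
--
--     # 解析条目 - 以"### "开头的是条目
--     entries = []
--     lines = inbox_content.split("\n")
--     current_entry = []
--     current_title = ""
--
--     for line in lines:
--         if line.startswith("### "):
--             if current_entry:
--                 entries.append({
--                     "title": current_title,
--                     "content": "\n".join(current_entry)
--                 })
--             current_title = line[4:]  # 去掉"### "
--             current_entry = [line]
--         elif current_entry:
--             current_entry.append(line)
--
--     if current_entry:
--         entries.append({
--             "title": current_title,
--             "content": "\n".join(current_entry)
--         })
--
--     return entries, before_inbox, after_inbox
-- ===== SOURCE B (Python) =====
-- def _split_groups(lines):
--     """Group the inbox lines right-to-left: each '### ' header line captures the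
--     pending lines below it; lines before the first header are discarded."""
--     groups, pending = [], []
--     for line in reversed(lines):
--         if line.startswith("### "):
--             groups.append([line] + pending[::-1])
--             pending = []
--         else:
--             pending.append(line)
--     groups.reverse()
--     return groups
--
--
-- def parse_inbox_entries(content):
--     """解析状态文件中的Inbox条目 (relative search in the tail, groups pass, then map to dicts)"""
--     inbox_start = content.find("## [Inbox")
--     if inbox_start == -1:
--         return [], content, ""
--
--     before_inbox, tail = content[:inbox_start], content[inbox_start:]
--     cut = tail.find("## [", 1)
--     if cut == -1:
--         cut = len(tail)
--     inbox_content, after_inbox = tail[:cut], tail[cut:]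
--
--     groups = _split_groups(inbox_content.split("\n"))
--     entries = [{"title": g[0][4:], "content": "\n".join(g)} for g in groups]
--
--     return entries, before_inbox, after_inbox
-- ===== Notes on version B (the rewrite author's own statement) =====
-- stated objective: alternative
-- what changed: A's single left-to-right fold with entries/current_entry/current_title mutable state and a trailing flush is replaced by a staged pipeline — a right-to-left pass grouping each entry-header line with the pending lines below it, then a map from groups to entry dicts — and the next-section search runs relative to the tail slice with a len() fallback instead of A's absolute search with a two-way branch.
import Mathlib
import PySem

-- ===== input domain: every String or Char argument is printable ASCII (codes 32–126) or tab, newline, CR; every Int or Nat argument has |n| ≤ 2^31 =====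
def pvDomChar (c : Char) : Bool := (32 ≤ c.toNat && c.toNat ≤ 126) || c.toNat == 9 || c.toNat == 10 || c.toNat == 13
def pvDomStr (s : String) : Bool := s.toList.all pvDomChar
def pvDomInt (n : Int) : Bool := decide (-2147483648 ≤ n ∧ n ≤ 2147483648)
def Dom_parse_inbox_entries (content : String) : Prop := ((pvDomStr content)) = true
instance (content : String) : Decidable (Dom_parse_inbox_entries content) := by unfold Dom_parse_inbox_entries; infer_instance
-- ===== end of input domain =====

-- B replaces A's single stateful fold (entries/current_entry/current_title + trailing flush)
-- by a staged pipeline — a right-to-left pass splitting the lines into header-led groups, then a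
-- map from groups to dicts — and searches the next section relative to the tail slice (same cost).

-- ===== PORT A =====
-- the dict {"title": t, "content": "\n".join(cur)} as an association list
def pvMkEntry (t : String) (cur : List String) : List (String × String) :=
  [("title", t), ("content", PySem.Str.join "\n" cur)]

-- one iteration of A's for-loop over (entries, current_entry, current_title)
def pvStepA (st : List (List (String × String)) × List String × String) (line : String) :
    List (List (String × String)) × List String × String :=
  let (entries, cur, title) := st
  if PySem.Str.startswith line "### " then
    (if cur ≠ [] then entries ++ [pvMkEntry title cur] else entries,
     [line], PySem.Str.slice line (some 4) none)
  else if cur ≠ [] then (entries, cur ++ [line], title)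
  else st

-- the trailing "if current_entry: entries.append(...)"
def pvFlushA (st : List (List (String × String)) × List String × String) :
    List (List (String × String)) :=
  let (entries, cur, title) := st
  if cur ≠ [] then entries ++ [pvMkEntry title cur] else entries

def parse_inbox_entries (content : String) : (List (List (String × String))) × String × String :=
  let inbox_start := PySem.Str.find content "## [Inbox"
  if inbox_start = -1 then ([], content, "")
  else
    let next_section := PySem.Str.findFrom content "## [" (inbox_start + 1)
    let (inbox_content, after_inbox) :=
      if next_section = -1 then (PySem.Str.slice content (some inbox_start) none, "")
      else (PySem.Str.slice content (some inbox_start) (some next_section),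
            PySem.Str.slice content (some next_section) none)
    let before_inbox := PySem.Str.slice content none (some inbox_start)
    let lines := (PySem.Str.split? inbox_content "\n").getD []
    let entries := pvFlushA (lines.foldl pvStepA ([], [], ""))
    (entries, before_inbox, after_inbox)

-- ===== PORT B =====
-- one iteration of _split_groups's loop over (groups, pending); pending[::-1] and the
-- final groups.reverse() are ported by hand as List.reverse (exact: a [::-1] full slice
-- and an in-place .reverse() are exactly list reversal)
def pvStepG (st : List (List String) × List String) (line : String) :
    List (List String) × List String :=
  if PySem.Str.startswith line "### " then (st.1 ++ [line :: st.2.reverse], [])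
  else (st.1, st.2 ++ [line])

-- the dict {"title": g[0][4:], "content": "\n".join(g)}; groups are never empty,
-- so g[0] is ported with a default that is never used
def pvMkEntryB (g : List String) : List (String × String) :=
  [("title", PySem.Str.slice (PySem.List.pyGetD g 0 "") (some 4) none),
   ("content", PySem.Str.join "\n" g)]

def parse_inbox_entries_alt (content : String) : (List (List (String × String))) × String × String :=
  let inbox_start := PySem.Str.find content "## [Inbox"
  if inbox_start = -1 then ([], content, "")
  else
    let before_inbox := PySem.Str.slice content none (some inbox_start)
    let tail := PySem.Str.slice content (some inbox_start) none
    let cut0 := PySem.Str.findFrom tail "## [" 1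
    let cut := if cut0 = -1 then PySem.Str.len tail else cut0
    let inbox_content := PySem.Str.slice tail none (some cut)
    let after_inbox := PySem.Str.slice tail (some cut) none
    let groups := ((((PySem.Str.split? inbox_content "\n").getD []).reverse).foldl pvStepG ([], [])).1.reverse
    (groups.map pvMkEntryB, before_inbox, after_inbox)

-- ===== PRECONDITION & SPEC =====
def Spec_parse_inbox_entries (content : String) (out : (List (List (String × String))) × String × String) : Prop := out = parse_inbox_entries_alt content
instance (content : String) (out : (List (List (String × String))) × String × String) : Decidable (Spec_parse_inbox_entries content out) := by unfold Spec_parse_inbox_entries; infer_instance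

-- ===== CLAIM (what is proved, stated in full; the proofs are below) =====
def Claim_equal_parse_inbox_entries : Prop := ∀ (content : String), Dom_parse_inbox_entries content → Spec_parse_inbox_entries content (parse_inbox_entries content)

-- ===== LEMMAS AND PROOFS =====

-- B's reversed loop as a foldr over the lines
def pvGrp (ls : List String) : List (List String) × List String :=
  ls.foldr (fun l st => pvStepG st l) ([], [])

theorem pvGrp_eq_foldl (ls : List String) :
    (ls.reverse).foldl pvStepG ([], []) = pvGrp ls := by
  simp [pvGrp, List.foldl_reverse]

-- A's loop with empty current_entry produces exactly B's groups; with a nonempty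
-- current_entry it first finishes that entry with B's trailing pending lines.
theorem pvLoopEq (ls : List String) :
    (∀ entries t, pvFlushA (ls.foldl pvStepA (entries, [], t)) =
        entries ++ ((pvGrp ls).1.reverse).map pvMkEntryB) ∧
    (∀ entries cur t, cur ≠ [] →
        pvFlushA (ls.foldl pvStepA (entries, cur, t)) =
          entries ++ pvMkEntry t (cur ++ (pvGrp ls).2.reverse) ::
            ((pvGrp ls).1.reverse).map pvMkEntryB) := by
  induction ls with
  | nil =>
    constructor
    · intro entries t; simp [pvFlushA, pvGrp]
    · intro entries cur t h; simp [pvFlushA, pvGrp, h]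
  | cons l ls ih =>
    obtain ⟨ih0, ih1⟩ := ih
    have hgrp : pvGrp (l :: ls) = pvStepG (pvGrp ls) l := by simp [pvGrp]
    constructor
    · intro entries t
      by_cases hl : PySem.Str.startswith l "### " = true
      · simp only [List.foldl, pvStepA, hl, if_true, ne_eq, not_true_eq_false, if_false]
        rw [ih1 entries [l] _ (by simp)]
        simp [PySem.Str.startswith] at hl
        simp [hgrp, pvStepG, hl, pvMkEntryB, pvMkEntry, PySem.List.pyGetD_zero_cons]
      · simp only [List.foldl, pvStepA, hl, Bool.false_eq_true, if_false, ne_eq,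
          not_true_eq_false]
        rw [ih0 entries t]
        simp [PySem.Str.startswith] at hl
        simp [hgrp, pvStepG, hl]
    · intro entries cur t h
      by_cases hl : PySem.Str.startswith l "### " = true
      · simp only [List.foldl, pvStepA, hl, ne_eq, h, if_pos]
        rw [ih1 _ [l] _ (by simp)]
        simp [PySem.Str.startswith] at hl
        simp [hgrp, pvStepG, hl, pvMkEntryB, pvMkEntry, PySem.List.pyGetD_zero_cons]
      · simp only [List.foldl, pvStepA, hl, Bool.false_eq_true, if_false, ne_eq, h,
          not_false_eq_true, ite_true]
        rw [ih1 _ (cur ++ [l]) _ (by simp)]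
        simp [PySem.Str.startswith] at hl
        simp [hgrp, pvStepG, hl]

-- the relative search in B's tail slice, expressed through A's absolute search
theorem pvFindTail (cs p4 : List Char) (k : Nat) (hk : k + 1 ≤ cs.length) :
    PySem.Chars.findFrom (cs.drop k) p4 1 =
      if PySem.Chars.find (cs.drop (k+1)) p4 = -1 then (-1 : Int)
      else 1 + PySem.Chars.find (cs.drop (k+1)) p4 := by
  have h1 : 1 ≤ (cs.drop k).length := by simp; omega
  have h := PySem.Chars.findFrom_natCast (cs.drop k) p4 1 h1
  simpa [List.drop_drop, Nat.add_comm] using h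

-- ===== VERDICT (by name: the statement is the Claim_ definition above) =====
set_option maxHeartbeats 1600000 in
theorem parse_inbox_entries_spec : Claim_equal_parse_inbox_entries := by
  intro content _
  unfold Spec_parse_inbox_entries parse_inbox_entries parse_inbox_entries_alt
  simp only [pvGrp_eq_foldl]
  by_cases h : PySem.Str.find content "## [Inbox" = -1
  · simp only [PySem.Str.find_eq] at h
    simp at h
    simp [h]
  · have hne : PySem.Chars.findFrom content.toList ("## [Inbox").toList 0 ≠ -1 := by
      simpa [PySem.Str.find_eq] using h
    obtain ⟨hi0, hpre, -⟩ :=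
      PySem.Chars.findFrom_natCast_spec content.toList ("## [Inbox").toList 0 (Nat.zero_le _)
        (by simpa using hne)
    rw [Nat.cast_zero, PySem.Chars.findFrom_zero] at hi0 hpre
    have hieq : PySem.Str.find content "## [Inbox" =
        (((PySem.Chars.find content.toList ("## [Inbox").toList).toNat : Nat) : Int) := by
      rw [PySem.Str.find_eq]; exact (Int.toNat_of_nonneg hi0).symm
    have hlen : (PySem.Chars.find content.toList ("## [Inbox").toList).toNat + 9 ≤
        content.toList.length := by
      have h9 := hpre.length_le
      have h9' : ("## [Inbox").toList.length = 9 := rfl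
      simp only [List.length_drop, h9'] at h9
      omega
    rw [if_neg h, if_neg h, hieq]
    generalize hgen : (PySem.Chars.find content.toList ("## [Inbox").toList).toNat = kn at hlen ⊢
    have hA := PySem.Chars.findFrom_natCast content.toList ("## [").toList (kn+1) (by omega)
    have htl : (PySem.Str.slice content (some ((kn : Nat) : Int)) none).toList
        = content.toList.drop kn := by
      rw [PySem.Str.toList_slice]
      simp [PySem.List.slice_from_natCast]
    have htl2 : PySem.Chars.slice content.toList (some ((kn : Nat) : Int)) none
        = content.toList.drop kn := by
      simp [PySem.List.slice_from_natCast]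
    have hB : PySem.Chars.findFrom (content.toList.drop kn) ("## [").toList 1 =
        if PySem.Chars.find (content.toList.drop (kn+1)) ("## [").toList = -1 then (-1 : Int)
        else 1 + PySem.Chars.find (content.toList.drop (kn+1)) ("## [").toList :=
      pvFindTail content.toList _ kn (by omega)
    simp only [PySem.Str.findFrom_eq]
    rw [show ((kn : Int) + 1) = (((kn+1 : Nat)) : Int) by push_cast; ring]
    rw [hA, htl, hB]
    by_cases hc : PySem.Chars.find (content.toList.drop (kn+1)) ("## [").toList = -1
    · -- no later section header: B's cut falls back to len(tail), the whole tail is the inbox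
      have g1 : PySem.Str.slice (PySem.Str.slice content (some ((kn : Nat) : Int)) none) none
            (some (PySem.Str.len (PySem.Str.slice content (some ((kn : Nat) : Int)) none)))
          = PySem.Str.slice content (some ((kn : Nat) : Int)) none := by
        apply String.toList_inj.mp
        simp only [PySem.Str.toList_slice, PySem.Str.len_eq, htl,
          PySem.Chars.slice_eq_listSlice, PySem.List.slice_to_natCast]
        simp
      have g2 : PySem.Str.slice (PySem.Str.slice content (some ((kn : Nat) : Int)) none)
            (some (PySem.Str.len (PySem.Str.slice content (some ((kn : Nat) : Int)) none))) none
          = "" := by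
        apply String.toList_inj.mp
        simp only [PySem.Str.toList_slice, PySem.Str.len_eq, htl,
          PySem.Chars.slice_eq_listSlice, PySem.List.slice_from_natCast]
        simp
        omega
      simp only [hc, reduceIte]
      rw [g1, g2]
      simp [(pvLoopEq _).1]
    · have hf0 : 0 ≤ PySem.Chars.find (content.toList.drop (kn+1)) ("## [").toList := by
        obtain ⟨h0, -, -⟩ :=
          PySem.Chars.findFrom_natCast_spec (content.toList.drop (kn+1)) ("## [").toList 0
            (Nat.zero_le _) (by rw [Nat.cast_zero, PySem.Chars.findFrom_zero]; exact hc)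
        rwa [Nat.cast_zero, PySem.Chars.findFrom_zero] at h0
      obtain ⟨fn, hfn⟩ : ∃ n : Nat,
          PySem.Chars.find (content.toList.drop (kn+1)) ("## [").toList = (n : Int) :=
        ⟨_, (Int.toNat_of_nonneg hf0).symm⟩
      rw [hfn]
      have hcn : ¬((fn : Int) = -1) := by omega
      have hcm : ¬((1 : Int) + (fn : Int) = -1) := by omega
      simp only [if_neg hcn, if_neg hcm]
      have e1 : PySem.Str.slice (PySem.Str.slice content (some ((kn : Nat) : Int)) none) none
            (some (1 + (fn : Int)))
          = PySem.Str.slice content (some ((kn : Nat) : Int))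
            (some (((kn+1 : Nat) : Int) + (fn : Int))) := by
        apply String.toList_inj.mp
        simp only [PySem.Str.toList_slice]
        rw [htl2]
        rw [show (1 + (fn : Int)) = ((1 + fn : Nat) : Int) by push_cast; ring,
            show (((kn+1 : Nat) : Int) + (fn : Int)) = ((kn + 1 + fn : Nat) : Int) by push_cast; ring]
        rw [PySem.Chars.slice_eq_listSlice, PySem.Chars.slice_eq_listSlice,
            PySem.List.slice_to_natCast, PySem.List.slice_natCast]
        congr 1
        omega
      have e2 : PySem.Str.slice (PySem.Str.slice content (some ((kn : Nat) : Int)) none)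
            (some (1 + (fn : Int))) none
          = PySem.Str.slice content (some (((kn+1 : Nat) : Int) + (fn : Int))) none := by
        apply String.toList_inj.mp
        simp only [PySem.Str.toList_slice]
        rw [htl2]
        rw [show (1 + (fn : Int)) = ((1 + fn : Nat) : Int) by push_cast; ring,
            show (((kn+1 : Nat) : Int) + (fn : Int)) = ((kn + 1 + fn : Nat) : Int) by push_cast; ring]
        rw [PySem.Chars.slice_eq_listSlice, PySem.Chars.slice_eq_listSlice,
            PySem.List.slice_from_natCast, PySem.List.slice_from_natCast, List.drop_drop]
        congr 1
        omega
      rw [e1, e2]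
      have hc1 : ¬((kn : Int) + 1 + (fn : Int) = -1) := by omega
      simp [(pvLoopEq _).1, hc1]
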